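-- pv_equiv track=rewrite | github.com/dvskr/RoleReady | roleready/apps/api/roleready_api/routes/align.py | _split_resume
-- ===== SOURCE A (Python) =====
-- from typing import Literal, List
--
-- def _split_resume(text: str) -> List[str]:
--     bullets = []
--     cur = []
--     for ln in text.splitlines():
--         ln = ln.strip()
--         if not ln: continue
--         if ln.endswith(".") and len(ln.split()) >= 5 and not cur:
--             bullets.append(ln)
--         else:
--             cur.append(ln)
--     if cur:
--         bullets.append(" ".join(cur))
--     return bullets[:200]
-- ===== SOURCE B (Python) =====
-- from typing import List
--
-- def _split_resume(text: str) -> List[str]: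
--     def go(lines: List[str]) -> List[str]:
--         if not lines:
--             return []
--         head = lines[0]
--         if head.endswith(".") and len(head.split()) >= 5:
--             return [head] + go(lines[1:])
--         return [" ".join(lines)]
--     cleaned = [s for s in (ln.strip() for ln in text.splitlines()) if s]
--     return go(cleaned)[:200]
-- ===== Notes on version B (the rewrite author's own statement) =====
-- stated objective: simpler
-- what changed: Replaces A's stateful two-accumulator loop (bullets/cur with an empty-cur latch) by a structural recursion on the cleaned line list that emits qualifying head lines one by one and, at the first non-qualifying line, returns the whole remaining list joined as one bullet.
import Mathlib
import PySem

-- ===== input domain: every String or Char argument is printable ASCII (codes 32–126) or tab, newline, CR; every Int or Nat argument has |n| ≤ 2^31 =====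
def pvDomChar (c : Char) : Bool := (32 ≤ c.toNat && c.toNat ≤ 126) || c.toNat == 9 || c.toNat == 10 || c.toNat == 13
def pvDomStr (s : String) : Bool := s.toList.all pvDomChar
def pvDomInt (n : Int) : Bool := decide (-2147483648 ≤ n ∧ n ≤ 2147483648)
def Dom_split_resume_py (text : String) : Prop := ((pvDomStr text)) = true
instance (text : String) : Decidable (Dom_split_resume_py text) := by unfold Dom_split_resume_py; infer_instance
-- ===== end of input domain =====

-- B replaces A's stateful two-accumulator loop (empty-cur latch) by a structural recursion
-- on the cleaned line list; same O(n) cost, simpler structure.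

-- ===== PORT A =====
-- the body of A's for-loop over text.splitlines(), state = (bullets, cur)
def pvStepA (st : List String × List String) (ln : String) : List String × List String :=
  let ln := PySem.Str.strip ln
  if ln = "" then st
  else if (PySem.Str.endswith ln "." && decide (5 ≤ (PySem.Str.split₀ ln).length)
             && st.2.isEmpty) = true
  then (st.1 ++ [ln], st.2)
  else (st.1, st.2 ++ [ln])

def split_resume_py (text : String) : List String :=
  let r := (PySem.Str.splitlines text).foldl pvStepA ([], [])
  let bullets := if r.2 = [] then r.1 else r.1 ++ [PySem.Str.join " " r.2]
  bullets.take 200    -- bullets[:200], nonnegative literal bound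

-- ===== PORT B =====
-- go(lines): emit qualifying head lines one by one; at the first non-qualifying line
-- return the whole remainder joined as a single bullet.
def pvGo : List String → List String
  | [] => []
  | h :: t =>
      if (PySem.Str.endswith h "." && decide (5 ≤ (PySem.Str.split₀ h).length)) = true
      then h :: pvGo t
      else [PySem.Str.join " " (h :: t)]

def split_resume_py_alt (text : String) : List String :=
  -- cleaned = [s for s in (ln.strip() for ln in text.splitlines()) if s]
  let cleaned := (PySem.Str.splitlines text).filterMap
      (fun ln => let s := PySem.Str.strip ln; if s = "" then none else some s)
  (pvGo cleaned).take 200    -- go(cleaned)[:200], nonnegative literal bound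

-- ===== PRECONDITION & SPEC =====
def Spec_split_resume_py (text : String) (out : List String) : Prop := out = split_resume_py_alt text
instance (text : String) (out : List String) : Decidable (Spec_split_resume_py text out) := by unfold Spec_split_resume_py; infer_instance

-- ===== CLAIM (what is proved, stated in full; the proofs are below) =====
def Claim_equal_split_resume_py : Prop := ∀ (text : String), Dom_split_resume_py text → Spec_split_resume_py text (split_resume_py text)

-- ===== LEMMAS AND PROOFS =====

def pvClean (ls : List String) : List String :=
  ls.filterMap (fun ln => let s := PySem.Str.strip ln; if s = "" then none else some s)

-- once cur is nonempty, every surviving line is appended to cur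
theorem pvStepA_stuck (ls : List String) (b c : List String) (hc : c ≠ []) :
    ls.foldl pvStepA (b, c) = (b, c ++ pvClean ls) := by
  induction ls generalizing c with
  | nil => simp [pvClean]
  | cons a ls ih =>
      have hce : c.isEmpty = false := by
        cases c with | nil => exact absurd rfl hc | cons _ _ => rfl
      by_cases hs : PySem.Str.strip a = ""
      · simp [pvClean, hs, pvStepA] at *
        exact ih c hc
      · simp only [List.foldl_cons, pvStepA, if_neg hs, hce, Bool.and_false,
          Bool.false_eq_true, if_false]
        rw [ih (c ++ [PySem.Str.strip a]) (by simp)]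
        simp [pvClean, hs]

-- A's assembled result from an empty cur equals b ++ pvGo of the cleaned remainder
theorem pvRun_go (ls : List String) (b : List String) :
    (let r := ls.foldl pvStepA (b, []);
     if r.2 = [] then r.1 else r.1 ++ [PySem.Str.join " " r.2]) =
      b ++ pvGo (pvClean ls) := by
  induction ls generalizing b with
  | nil => simp [pvClean, pvGo]
  | cons a ls ih =>
      by_cases hs : PySem.Str.strip a = ""
      · simpa [pvClean, List.filterMap_cons, hs, pvStepA] using ih b
      · by_cases hq : (PySem.Str.endswith (PySem.Str.strip a) "."
              && decide (5 ≤ (PySem.Str.split₀ (PySem.Str.strip a)).length)) = true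
        · have hcl : pvClean (a :: ls) = PySem.Str.strip a :: pvClean ls := by
            simp [pvClean, hs]
          simp only [List.foldl_cons, pvStepA, if_neg hs, List.isEmpty_nil,
            Bool.and_true, hq, if_true]
          rw [ih (b ++ [PySem.Str.strip a]), hcl, pvGo, if_pos hq]
          simp
        · have hcl : pvClean (a :: ls) = PySem.Str.strip a :: pvClean ls := by
            simp [pvClean, hs]
          have hq' : (PySem.Str.endswith (PySem.Str.strip a) "."
              && decide (5 ≤ (PySem.Str.split₀ (PySem.Str.strip a)).length)) = false := by
            simpa using hq
          simp only [List.foldl_cons, pvStepA, if_neg hs, List.isEmpty_nil,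
            Bool.and_true, hq', Bool.false_eq_true, if_false]
          rw [List.nil_append, pvStepA_stuck ls b [PySem.Str.strip a] (by simp)]
          have h2 : ¬ (((b, [PySem.Str.strip a] ++ pvClean ls) : List String × List String).2 = []) := by simp
          rw [if_neg h2, hcl, pvGo,
            if_neg (by rw [hq']; exact Bool.false_ne_true)]
          simp

-- ===== VERDICT (by name: the statement is the Claim_ definition above) =====
theorem split_resume_py_spec : Claim_equal_split_resume_py := by
  intro text _
  unfold Spec_split_resume_py split_resume_py split_resume_py_alt
  have h := pvRun_go (PySem.Str.splitlines text) []
  simp only [List.nil_append] at h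
  simp only [h]
  rfl
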